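-- pv_equiv track=rewrite | github.com/AmirNiiazov/codewars | Smallest possible sum.py | solution
-- ===== SOURCE A (Python) =====
-- def solution(lst):
--     min_val, max_val = min(lst), max(lst)
--     while min_val != max_val:
--         min_idx = lst.index(min_val)
--         max_idx = lst.index(max_val)
--         lst[max_idx] = lst[max_idx] - lst[min_idx]
--         min_val, max_val = min(lst), max(lst)
--     return sum(lst)
-- ===== SOURCE B (Python) =====
-- def solution(lst):
--     # Closed form: the process reduces every element to gcd(lst), so the answer
--     # is gcd(lst) * len(lst).  gcd computed with an explicit Euclidean modulo loop.
--     # Return-value equivalence only: A mutates lst in place, B does not.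
--     g = lst[0]
--     for x in lst[1:]:
--         a, b = g, x
--         while b:
--             a, b = b, a % b
--         g = a
--     return g * len(lst)
-- ===== Notes on version B (the rewrite author's own statement) =====
-- stated objective: alternative
-- what changed: Replaces A's simulation of the subtract-min-from-max process (rescanning the list for min/max and their indexes every iteration until all elements are equal) with a single pass computing the list gcd by the Euclidean modulo algorithm and returning gcd*len(lst); intended as faster (A timed out where B returned in a timing run, but no clean ratio could be measured).
-- outside the precondition, e.g. on solution([]): A raises ValueError, B raises IndexError
import Mathlib
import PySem

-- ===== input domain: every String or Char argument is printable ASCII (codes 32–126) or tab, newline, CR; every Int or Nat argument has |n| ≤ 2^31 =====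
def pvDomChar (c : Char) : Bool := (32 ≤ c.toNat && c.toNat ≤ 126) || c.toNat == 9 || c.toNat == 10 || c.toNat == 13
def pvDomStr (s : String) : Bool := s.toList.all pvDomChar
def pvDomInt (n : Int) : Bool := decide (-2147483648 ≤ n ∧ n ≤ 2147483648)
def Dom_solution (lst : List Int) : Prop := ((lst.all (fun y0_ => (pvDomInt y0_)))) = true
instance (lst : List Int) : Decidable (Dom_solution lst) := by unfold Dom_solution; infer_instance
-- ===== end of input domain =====

-- B replaces A's subtract-min-from-max simulation by one Euclidean-gcd pass returning gcd*len;
-- equivalence is about the RETURN value only (A mutates its argument in place, B does not).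

-- ===== PORT A =====
-- one iteration of A's while-body: lst[max_idx] = lst[max_idx] - lst[min_idx]
def solStep (lst : List Int) (mn mx : Int) : List Int :=
  let minIdx : Nat := (PySem.List.index? lst mn).getD 0
  let maxIdx : Nat := (PySem.List.index? lst mx).getD 0
  lst.set maxIdx (lst.getD maxIdx 0 - lst.getD minIdx 0)

-- A's while loop, fuel-bounded (the proof shows sum.toNat + 1 fuel suffices on Pre_)
def solLoop : Nat → List Int → Int → Int → List Int
  | 0, lst, _, _ => lst
  | f + 1, lst, mn, mx =>
    if mn = mx then lst
    else
      match PySem.List.min? (solStep lst mn mx) (fun x => x),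
            PySem.List.max? (solStep lst mn mx) (fun x => x) with
      | some mn', some mx' => solLoop f (solStep lst mn mx) mn' mx'
      | _, _ => solStep lst mn mx

def solution (lst : List Int) : Int :=
  match PySem.List.min? lst (fun x => x), PySem.List.max? lst (fun x => x) with
  | some mn, some mx => (solLoop (lst.sum.toNat + 1) lst mn mx).sum
  | _, _ => 0   -- min([]) raises ValueError: excluded by Pre_

-- ===== PORT B =====
-- termination of Python's `while b: a, b = b, a % b`
theorem pymod_natAbs_lt (a b : Int) (hb : b ≠ 0) :
    (PySem.Int.mod a b).natAbs < b.natAbs := by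
  rcases lt_or_gt_of_ne hb with h | h
  · have := PySem.Int.mod_neg_bounds a h
    omega
  · have h1 := PySem.Int.mod_nonneg a h
    have h2 := PySem.Int.mod_lt a h
    omega

def euclid (a b : Int) : Int :=
  if hb : b = 0 then a else euclid b (PySem.Int.mod a b)
termination_by b.natAbs
decreasing_by exact pymod_natAbs_lt a b hb

def solution_alt (lst : List Int) : Int :=
  match lst with
  | [] => 0   -- lst[0] raises IndexError: excluded by Pre_
  | g0 :: rest => (rest.foldl (fun g x => euclid g x) g0) * (lst.length : Int)

-- ===== PRECONDITION & SPEC =====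
-- Pre_ is exactly where A returns: min([]) raises ValueError on the empty list, and on any
-- other list that is neither all-positive nor all-equal A's loop never terminates.
def Pre_solution (lst : List Int) : Prop :=
  lst ≠ [] ∧ ((∀ x ∈ lst, 0 < x) ∨ (∀ x ∈ lst, x = lst.headI))
instance (lst : List Int) : Decidable (Pre_solution lst) := by unfold Pre_solution; infer_instance
def pvWitness_solution : List Int := [6, 9, 21]

def Spec_solution (lst : List Int) (out : Int) : Prop := out = solution_alt lst
instance (lst : List Int) (out : Int) : Decidable (Spec_solution lst out) := by unfold Spec_solution; infer_instance

-- ===== CLAIM (what is proved, stated in full; the proofs are below) =====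
def Claim_equal_solution : Prop :=
  ∀ (lst : List Int), Dom_solution lst → Pre_solution lst → Spec_solution lst (solution lst)

-- ===== LEMMAS AND PROOFS =====

-- gcd of a list, the common value both programs compute
def gcdN : List Int → Nat
  | [] => 0
  | x :: t => Int.gcd x (gcdN t)

theorem dvd_gcdN_iff (l : List Int) (d : Nat) :
    d ∣ gcdN l ↔ ∀ x ∈ l, (d : Int) ∣ x := by
  induction l with
  | nil => simp [gcdN]
  | cons x t ih =>
    simp only [gcdN, List.mem_cons]
    rw [Int.dvd_gcd_iff]
    constructor
    · rintro ⟨h1, h2⟩ y hy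
      rcases hy with rfl | hy
      · exact h1
      · exact ih.mp (Int.natCast_dvd_natCast.mp h2) y hy
    · intro h
      exact ⟨h x (Or.inl rfl), Int.natCast_dvd_natCast.mpr (ih.mpr (fun y hy => h y (Or.inr hy)))⟩

theorem sum_const (l : List Int) (c : Int) (h : ∀ x ∈ l, x = c) :
    l.sum = c * l.length := by
  induction l with
  | nil => simp
  | cons x t ih =>
    have hx := h x (by simp)
    have := ih (fun y hy => h y (by simp [hy]))
    simp [this, hx]; ring

theorem length_le_sum (l : List Int) (h : ∀ x ∈ l, 0 < x) :
    (l.length : Int) ≤ l.sum := by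
  induction l with
  | nil => simp
  | cons x t ih =>
    have := ih (fun y hy => h y (by simp [hy]))
    have hx := h x (by simp)
    simp only [List.sum_cons, List.length_cons]
    push_cast; omega

theorem gcdN_const (l : List Int) (c : Int) (hne : l ≠ []) (h : ∀ x ∈ l, x = c) :
    gcdN l = c.natAbs := by
  induction l with
  | nil => simp at hne
  | cons x t ih =>
    have hx := h x (by simp)
    cases t with
    | nil => simp [gcdN, hx, Int.gcd]
    | cons y u =>
      have := ih (by simp) (fun z hz => h z (by simp [List.mem_cons] at hz ⊢; tauto))
      simp [gcdN] at this ⊢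
      rw [this, hx]
      simp [Int.gcd, Int.natAbs_abs]

-- one Euclidean-modulo step keeps the gcd
theorem gcdstep (a b : Int) (ha : 0 ≤ a) : Int.gcd b (a % b) = Int.gcd a b := by
  rw [Int.gcd, Int.gcd, Int.natAbs_emod_of_nonneg ha, Nat.gcd_comm, ← Nat.gcd_rec, Nat.gcd_comm]

theorem euclid_eq_gcd_aux : ∀ (n : Nat) (a b : Int), b.natAbs ≤ n → 0 ≤ a → 0 ≤ b →
    euclid a b = ((Int.gcd a b : Nat) : Int) := by
  intro n
  induction n with
  | zero =>
    intro a b hn ha _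
    have hb0 : b = 0 := by omega
    subst hb0
    rw [euclid]
    simp [Int.natAbs_of_nonneg ha]
  | succ n ih =>
    intro a b hn ha hb
    rw [euclid]
    split_ifs with h
    · subst h
      simp [Int.natAbs_of_nonneg ha]
    · have hbpos : 0 < b := lt_of_le_of_ne hb (Ne.symm h)
      rw [PySem.Int.mod_eq_emod_of_pos hbpos]
      have hm1 : 0 ≤ a % b := Int.emod_nonneg a (ne_of_gt hbpos)
      have hm2 : (a % b).natAbs < b.natAbs := by
        have := Int.emod_lt_of_pos a hbpos
        omega
      rw [ih b (a % b) (by omega) hb hm1, gcdstep a b ha]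

theorem euclid_eq_gcd (a b : Int) (ha : 0 ≤ a) (hb : 0 ≤ b) :
    euclid a b = ((Int.gcd a b : Nat) : Int) :=
  euclid_eq_gcd_aux b.natAbs a b le_rfl ha hb

-- B's fold computes the list gcd
theorem fold_euclid : ∀ (t : List Int) (g : Int), 0 ≤ g → (∀ x ∈ t, 0 ≤ x) →
    t.foldl (fun g x => euclid g x) g = ((gcdN (g :: t) : Nat) : Int) := by
  intro t
  induction t with
  | nil =>
    intro g hg _
    simp [gcdN, Int.natAbs_of_nonneg hg]
  | cons x t ih =>
    intro g hg hall
    simp only [List.foldl_cons]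
    rw [euclid_eq_gcd g x hg (hall x (by simp)),
        ih _ (Int.natCast_nonneg _) (fun y hy => hall y (by simp [hy]))]
    have : gcdN (((Int.gcd g x : Nat) : Int) :: t) = gcdN (g :: x :: t) := by
      simp [gcdN, Int.gcd, Int.natAbs_natCast, Nat.gcd_assoc]
    rw [this]

-- A's loop body, analysed: positivity, gcd, length, and sum after one step
theorem step_main (lst : List Int) (mn mx : Int)
    (hpos : ∀ x ∈ lst, 0 < x)
    (hmn : PySem.List.min? lst (fun x => x) = some mn)
    (hmx : PySem.List.max? lst (fun x => x) = some mx)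
    (hne : mn ≠ mx) :
    (∀ x ∈ solStep lst mn mx, 0 < x) ∧
    gcdN (solStep lst mn mx) = gcdN lst ∧
    (solStep lst mn mx).length = lst.length ∧
    (solStep lst mn mx).sum = lst.sum - mn := by
  have hmnm : mn ∈ lst := PySem.List.min?_mem hmn
  have hmxm : mx ∈ lst := PySem.List.max?_mem hmx
  have hmin : ∀ y ∈ lst, mn ≤ y := PySem.List.min?_isMin hmn
  have hmax : ∀ y ∈ lst, y ≤ mx := PySem.List.max?_isMax hmx
  have hlt : mn < mx := lt_of_le_of_ne (hmin mx hmxm) hne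
  obtain ⟨i, hieq⟩ : ∃ i, PySem.List.index? lst mn = some i :=
    Option.isSome_iff_exists.mp ((PySem.List.index?_isSome_iff lst mn).mpr hmnm)
  obtain ⟨j, hjeq⟩ : ∃ j, PySem.List.index? lst mx = some j :=
    Option.isSome_iff_exists.mp ((PySem.List.index?_isSome_iff lst mx).mpr hmxm)
  obtain ⟨hilt, hival, -⟩ := PySem.List.getElem_of_index?_eq_some hieq
  obtain ⟨hjlt, hjval, -⟩ := PySem.List.getElem_of_index?_eq_some hjeq
  have hij : i ≠ j := by
    intro h; subst h; exact hne (hival.symm.trans hjval)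
  have hstep : solStep lst mn mx = lst.set j (mx - mn) := by
    unfold solStep
    rw [hieq, hjeq]
    simp only [Option.getD_some]
    rw [List.getD_eq_getElem lst 0 hjlt, List.getD_eq_getElem lst 0 hilt, hival, hjval]
  rw [hstep]
  have hjlt' : j < (lst.set j (mx - mn)).length := by
    rw [List.length_set]; exact hjlt
  have hilt' : i < (lst.set j (mx - mn)).length := by
    rw [List.length_set]; exact hilt
  have hmnset : mn ∈ lst.set j (mx - mn) := by
    have h1 := List.getElem_mem hilt'
    rwa [List.getElem_set_ne (fun h => hij h.symm), hival] at h1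
  have hsubset : mx - mn ∈ lst.set j (mx - mn) := by
    have h1 := List.getElem_mem hjlt'
    rwa [List.getElem_set_self] at h1
  refine ⟨?_, ?_, List.length_set, ?_⟩
  · intro x hx
    rcases List.mem_or_eq_of_mem_set hx with hx | rfl
    · exact hpos x hx
    · omega
  · apply Nat.dvd_antisymm
    · rw [dvd_gcdN_iff]
      have hL' : ∀ x ∈ lst.set j (mx - mn), ((gcdN (lst.set j (mx - mn)) : Nat) : Int) ∣ x :=
        (dvd_gcdN_iff _ _).mp dvd_rfl
      have hdmn := hL' mn hmnset
      have hdsub := hL' (mx - mn) hsubset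
      have hdmx : ((gcdN (lst.set j (mx - mn)) : Nat) : Int) ∣ mx := by
        have := dvd_add hdsub hdmn
        simpa using this
      intro x hxm
      obtain ⟨k, hk, rfl⟩ := List.mem_iff_getElem.mp hxm
      by_cases hkj : k = j
      · subst hkj; rw [hjval]; exact hdmx
      · refine hL' _ ?_
        have : (lst.set j (mx - mn))[k]'(by rw [List.length_set]; exact hk) = lst[k] :=
          List.getElem_set_ne (fun h => hkj h.symm) _
        rw [← this]
        exact List.getElem_mem _
    · rw [dvd_gcdN_iff]
      have hall : ∀ x ∈ lst, ((gcdN lst : Nat) : Int) ∣ x := (dvd_gcdN_iff _ _).mp dvd_rfl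
      intro x hx
      rcases List.mem_or_eq_of_mem_set hx with hx | rfl
      · exact hall x hx
      · exact dvd_sub (hall mx hmxm) (hall mn hmnm)
  · rw [List.sum_set, if_pos hjlt]
    have hsplit : lst.sum = (lst.take j).sum + mx + (lst.drop (j + 1)).sum := by
      conv_lhs => rw [← List.take_append_drop j lst]
      rw [List.sum_append, List.drop_eq_getElem_cons hjlt, List.sum_cons, hjval]
      ring
    omega

-- the loop reaches the all-gcd state: its sum is gcd * length
theorem loop_sum : ∀ (f : Nat) (lst : List Int) (mn mx : Int),
    (∀ x ∈ lst, 0 < x) →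
    PySem.List.min? lst (fun x => x) = some mn →
    PySem.List.max? lst (fun x => x) = some mx →
    lst.sum ≤ (f : Int) →
    (solLoop f lst mn mx).sum = ((gcdN lst : Nat) : Int) * lst.length := by
  intro f
  induction f with
  | zero =>
    intro lst mn mx hpos hmn hmx hf
    exfalso
    have hne : lst ≠ [] := by
      intro h; subst h
      have := PySem.List.min?_mem hmn
      simp at this
    have h1 : 1 ≤ lst.length := by
      cases lst with
      | nil => exact absurd rfl hne
      | cons a t => simp
    have := length_le_sum lst hpos
    simp only [Nat.cast_zero] at hf
    have : (1 : Int) ≤ lst.length := by exact_mod_cast h1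
    omega
  | succ f ih =>
    intro lst mn mx hpos hmn hmx hf
    rw [solLoop]
    by_cases heq : mn = mx
    · rw [if_pos heq]
      subst heq
      have hconst : ∀ x ∈ lst, x = mn := fun x hx =>
        le_antisymm (PySem.List.max?_isMax hmx x hx) (PySem.List.min?_isMin hmn x hx)
      have hne : lst ≠ [] := by
        intro h; subst h
        have := PySem.List.min?_mem hmn
        simp at this
      rw [sum_const lst mn hconst, gcdN_const lst mn hne hconst]
      have hmnpos : 0 < mn := hpos mn (PySem.List.min?_mem hmn)
      rw [Int.natAbs_of_nonneg (le_of_lt hmnpos)]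
    · rw [if_neg heq]
      obtain ⟨hpos', hgcd', hlen', hsum'⟩ := step_main lst mn mx hpos hmn hmx heq
      have hne' : solStep lst mn mx ≠ [] := by
        intro h
        have hne : lst ≠ [] := by
          intro h0; subst h0
          have := PySem.List.min?_mem hmn
          simp at this
        rw [h] at hlen'
        cases lst with
        | nil => exact hne rfl
        | cons a t => simp at hlen'
      cases hmn' : PySem.List.min? (solStep lst mn mx) (fun x => x) with
      | none => exact absurd ((PySem.List.min?_eq_none_iff _ _).mp hmn') hne'
      | some mn' =>
        cases hmx' : PySem.List.max? (solStep lst mn mx) (fun x => x) with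
        | none => exact absurd ((PySem.List.max?_eq_none_iff _ _).mp hmx') hne'
        | some mx' =>
          have hmnpos : 0 < mn := hpos mn (PySem.List.min?_mem hmn)
          have hbound : (solStep lst mn mx).sum ≤ (f : Int) := by
            rw [hsum']; push_cast at hf ⊢; omega
          rw [ih (solStep lst mn mx) mn' mx' hpos' hmn' hmx' hbound, hgcd', hlen']

-- A on an all-positive list
theorem solution_eq_pos (lst : List Int) (hne : lst ≠ []) (hpos : ∀ x ∈ lst, 0 < x) :
    solution lst = ((gcdN lst : Nat) : Int) * lst.length := by
  unfold solution
  cases hmn : PySem.List.min? lst (fun x => x) with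
  | none => exact absurd ((PySem.List.min?_eq_none_iff _ _).mp hmn) hne
  | some mn =>
    cases hmx : PySem.List.max? lst (fun x => x) with
    | none => exact absurd ((PySem.List.max?_eq_none_iff _ _).mp hmx) hne
    | some mx =>
      apply loop_sum
      · exact hpos
      · exact hmn
      · exact hmx
      · have hnn : 0 ≤ lst.sum := by
          have h1 : (lst.length : Int) ≤ lst.sum := length_le_sum lst hpos
          have : (0 : Int) ≤ lst.length := by positivity
          omega
        rw [show ((lst.sum.toNat + 1 : Nat) : Int) = (lst.sum.toNat : Int) + 1 by push_cast; ring,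
            Int.toNat_of_nonneg hnn]
        omega

-- B on an all-positive list
theorem alt_eq_pos (lst : List Int) (hne : lst ≠ []) (hpos : ∀ x ∈ lst, 0 < x) :
    solution_alt lst = ((gcdN lst : Nat) : Int) * lst.length := by
  cases lst with
  | nil => exact absurd rfl hne
  | cons g rest =>
    show List.foldl (fun g x => euclid g x) g rest * ((g :: rest).length : Int)
        = ((gcdN (g :: rest) : Nat) : Int) * (g :: rest).length
    rw [fold_euclid rest g (le_of_lt (hpos g (by simp)))
        (fun y hy => le_of_lt (hpos y (by simp [hy])))]

-- Python's gcd loop is a fixpoint at equal arguments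
theorem euclid_self (c : Int) : euclid c c = c := by
  by_cases h : c = 0
  · subst h; rw [euclid]; simp
  · rw [euclid, dif_neg h, (PySem.Int.mod_eq_zero_iff_dvd c c).mpr dvd_rfl, euclid]
    simp

theorem fold_const (t : List Int) (c : Int) (h : ∀ x ∈ t, x = c) :
    t.foldl (fun g x => euclid g x) c = c := by
  induction t with
  | nil => rfl
  | cons x u ih =>
    simp only [List.foldl_cons]
    rw [h x (by simp), euclid_self]
    exact ih (fun y hy => h y (by simp [hy]))

-- ===== VERDICT (by name: the statement is the Claim_ definition above) =====
theorem solution_spec : Claim_equal_solution := by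
  intro lst _hdom hpre
  obtain ⟨hne, hcase⟩ := hpre
  unfold Spec_solution
  rcases hcase with hpos | heqq
  · rw [solution_eq_pos lst hne hpos, alt_eq_pos lst hne hpos]
  · cases lst with
    | nil => exact absurd rfl hne
    | cons c rest =>
      simp only [List.headI] at heqq
      have hc : ∀ x ∈ c :: rest, x = c := heqq
      -- B's side
      have hB : solution_alt (c :: rest) = c * (c :: rest).length := by
        show List.foldl (fun g x => euclid g x) c rest * ((c :: rest).length : Int)
            = c * (c :: rest).length
        rw [fold_const rest c (fun y hy => hc y (by simp [hy]))]
      -- A's side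
      unfold solution
      cases hmn : PySem.List.min? (c :: rest) (fun x => x) with
      | none => simp [PySem.List.min?_eq_none_iff] at hmn
      | some mn =>
        cases hmx : PySem.List.max? (c :: rest) (fun x => x) with
        | none => simp [PySem.List.max?_eq_none_iff] at hmx
        | some mx =>
          have hmnc : mn = c := hc mn (PySem.List.min?_mem hmn)
          have hmxc : mx = c := hc mx (PySem.List.max?_mem hmx)
          show (solLoop ((c :: rest).sum.toNat + 1) (c :: rest) mn mx).sum
              = solution_alt (c :: rest)
          have hloop : solLoop ((c :: rest).sum.toNat + 1) (c :: rest) mn mx = c :: rest := by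
            rw [solLoop, if_pos (hmnc.trans hmxc.symm)]
          rw [hloop, hB, sum_const (c :: rest) c hc]
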